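-- pv_equiv track=rewrite | github.com/awillard1/burp-extensions | id_hash_advanced.py | _is_ignored_path
-- ===== SOURCE A (Python) =====
-- IGNORED_EXTS = (".js", ".css", ".map", ".woff", ".woff2", ".ttf", ".otf", ".eot", ".svg", ".ico")
--
-- def _is_ignored_path(url_path):
--     try:
--         if not url_path:
--             return False
--         p = url_path.split("?", 1)[0].lower()
--         return any(p.endswith(ext) for ext in IGNORED_EXTS)
--     except Exception:
--         return False
-- ===== SOURCE B (Python) =====
-- IGNORED_EXTS = (".js", ".css", ".map", ".woff", ".woff2", ".ttf", ".otf", ".eot", ".svg", ".ico")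
-- _IGNORED_SET = frozenset(IGNORED_EXTS)
--
-- def _is_ignored_path(url_path):
--     if not url_path:
--         return False
--     p = url_path.split("?", 1)[0].lower()
--     i = p.rfind(".")
--     if i == -1:
--         return False
--     return p[i:] in _IGNORED_SET
-- ===== Notes on version B (the rewrite author's own statement) =====
-- stated objective: idiomatic
-- what changed: Instead of scanning all ten ignored extensions with any(p.endswith(ext) ...), B extracts the suffix starting at the last dot (rfind) and performs one frozenset membership test.
import Mathlib
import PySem

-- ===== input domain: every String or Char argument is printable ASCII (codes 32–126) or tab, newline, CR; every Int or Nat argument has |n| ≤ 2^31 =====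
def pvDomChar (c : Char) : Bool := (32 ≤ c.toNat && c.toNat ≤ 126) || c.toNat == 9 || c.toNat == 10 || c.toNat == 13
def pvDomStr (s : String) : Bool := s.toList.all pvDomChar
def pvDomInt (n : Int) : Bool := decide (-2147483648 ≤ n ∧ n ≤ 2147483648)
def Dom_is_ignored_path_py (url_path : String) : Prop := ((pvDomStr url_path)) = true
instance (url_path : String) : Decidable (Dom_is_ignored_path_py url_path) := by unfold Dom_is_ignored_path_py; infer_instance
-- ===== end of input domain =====

-- B replaces the any(p.endswith(ext) for ext in IGNORED_EXTS) scan by extracting the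
-- suffix from the last dot (rfind) and one set-membership test (objective: idiomatic).

-- ===== PORT A =====
def pvEXTS : List String := [".js", ".css", ".map", ".woff", ".woff2", ".ttf", ".otf", ".eot", ".svg", ".ico"]

def is_ignored_path_py (url_path : String) : Bool :=
  -- try/except Exception → False: the 'none' fallbacks below mirror the except branch
  -- (they are unreachable: split with a nonempty sep never fails and returns ≥ 1 piece)
  if url_path = "" then false
  else
    match PySem.Str.splitMax? url_path "?" 1 with
    | none => false
    | some parts =>
      match PySem.List.pyGet? parts 0 with
      | none => false
      | some s =>
        let p := PySem.Str.lower s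
        pvEXTS.any (fun ext => PySem.Str.endswith p ext)

-- ===== PORT B =====
def is_ignored_path_py_alt (url_path : String) : Bool :=
  if url_path = "" then false
  else
    -- split("?", 1)[0]: a nonempty separator always yields a nonempty list, so [0] is total
    let p := PySem.Str.lower (((PySem.Str.splitMax? url_path "?" 1).getD []).headD "")
    let i := PySem.Str.rfind p "."
    if i = -1 then false
    else (PySem.Set.ofList pvEXTS).contains (PySem.Str.slice p (some i) none)

-- ===== PRECONDITION & SPEC =====
def Spec_is_ignored_path_py (url_path : String) (out : Bool) : Prop := out = is_ignored_path_py_alt url_path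
instance (url_path : String) (out : Bool) : Decidable (Spec_is_ignored_path_py url_path out) := by unfold Spec_is_ignored_path_py; infer_instance

-- ===== CLAIM (what is proved, stated in full; the proofs are below) =====
def Claim_equal_is_ignored_path_py : Prop := ∀ (url_path : String), Dom_is_ignored_path_py url_path → Spec_is_ignored_path_py url_path (is_ignored_path_py url_path)

-- ===== LEMMAS AND PROOFS =====

-- [c].isPrefixOf l checks exactly the first element
theorem pv_single_isPrefixOf (l : List Char) (c : Char) :
    [c].isPrefixOf l = true ↔ l[0]? = some c := by
  cases l with
  | nil => simp [List.isPrefixOf]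
  | cons b t =>
    rw [List.isPrefixOf_iff_prefix]
    constructor
    · intro hp
      rcases List.cons_prefix_cons.mp hp with ⟨h1, -⟩
      simp [h1]
    · intro h
      have hb : c = b := by simpa [eq_comm] using h
      exact List.cons_prefix_cons.mpr ⟨hb, List.nil_prefix⟩

-- unfolding equations of rfind's worker (definitional)
theorem pv_go_zero (s sub : List Char) :
    PySem.Chars.rfind.go s sub 0 = if sub.isPrefixOf s then 0 else -1 := rfl

theorem pv_go_succ (s sub : List Char) (j : Nat) :
    PySem.Chars.rfind.go s sub (j + 1)
    = if sub.isPrefixOf (s.drop (j + 1)) then ((j : Int) + 1) else PySem.Chars.rfind.go s sub j := rfl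

-- spec of rfind's worker for the single-character needle '.'
theorem pv_rfind_go_spec (s : List Char) (j : Nat) :
    (PySem.Chars.rfind.go s ['.'] j = -1 ∧ ∀ i : Nat, i ≤ j → s[i]? ≠ some '.')
    ∨ ∃ i : Nat, i ≤ j ∧ PySem.Chars.rfind.go s ['.'] j = (i : Int) ∧ s[i]? = some '.'
        ∧ ∀ k : Nat, i < k → k ≤ j → s[k]? ≠ some '.' := by
  induction j with
  | zero =>
    by_cases h : s[0]? = some '.'
    · refine Or.inr ⟨0, le_refl _, ?_, h, by omega⟩
      have hp : [('.' : Char)].isPrefixOf s = true := (pv_single_isPrefixOf s '.').mpr (by simpa using h)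
      simp [pv_go_zero, hp]
    · refine Or.inl ⟨?_, ?_⟩
      · have hnp : ¬ ([('.' : Char)].isPrefixOf s = true) := fun hp => h ((pv_single_isPrefixOf s '.').mp hp)
        simp [pv_go_zero, hnp]
      · intro i hi; interval_cases i; exact h
  | succ j ih =>
    by_cases h : s[j + 1]? = some '.'
    · refine Or.inr ⟨j + 1, le_refl _, ?_, h, by omega⟩
      have hp : [('.' : Char)].isPrefixOf (s.drop (j + 1)) = true := by
        rw [pv_single_isPrefixOf]; simpa using h
      simp [pv_go_succ, hp]
    · have hp : ¬ ([('.' : Char)].isPrefixOf (s.drop (j + 1)) = true) := by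
        rw [pv_single_isPrefixOf]; simpa using h
      have hstep : PySem.Chars.rfind.go s ['.'] (j + 1) = PySem.Chars.rfind.go s ['.'] j := by
        simp [pv_go_succ, hp]
      rcases ih with ⟨h1, h2⟩ | ⟨i, hi, hgo, hdot, hmax⟩
      · refine Or.inl ⟨hstep.trans h1, ?_⟩
        intro i hi
        rcases Nat.lt_or_ge i (j + 1) with hlt | hge
        · exact h2 i (by omega)
        · have hieq : i = j + 1 := by omega
          simpa [hieq] using h
      · refine Or.inr ⟨i, by omega, hstep.trans hgo, hdot, ?_⟩
        intro k hik hk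
        rcases Nat.lt_or_ge k (j + 1) with hlt | hge
        · exact hmax k hik (by omega)
        · have hkeq : k = j + 1 := by omega
          simpa [hkeq] using h

-- the suffix of q from its last dot is the matching extension
theorem pv_drop_eq_of_suffix (q r : List Char) (i : Nat)
    (hr : '.' ∉ r) (hsuf : ('.' :: r) <:+ q) (hi : q[i]? = some '.')
    (hmax : ∀ k : Nat, i < k → k ≤ q.length → q[k]? ≠ some '.') :
    q.drop i = '.' :: r := by
  rcases hsuf with ⟨t, ht⟩
  have hm : q[t.length]? = some '.' := by
    subst ht
    rw [List.getElem?_append_right (by omega)]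
    simp
  have hilen : i < q.length := by
    by_contra h
    rw [List.getElem?_eq_none (by omega)] at hi
    simp at hi
  have hmlen : t.length < q.length := by
    by_contra h
    rw [List.getElem?_eq_none (by omega)] at hm
    simp at hm
  have hge : t.length ≤ i := by
    by_contra h
    exact hmax t.length (by omega) (by omega) hm
  have hle : i ≤ t.length := by
    by_contra h
    subst ht
    rw [List.getElem?_append_right (by omega)] at hi
    have hidx : i - t.length = (i - t.length - 1) + 1 := by omega
    rw [hidx, List.getElem?_cons_succ] at hi
    exact hr (List.mem_of_getElem? hi)
  have hieq : i = t.length := by omega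
  subst hieq; subst ht
  simp
-- every extension is '.'-headed with a dot-free tail
def pvGoodExt (e : String) : Bool :=
  match e.toList with
  | '.' :: r => !r.contains '.'
  | _ => false

theorem pv_goodExt_spec (e : String) (h : pvGoodExt e = true) :
    ∃ r, e.toList = '.' :: r ∧ '.' ∉ r := by
  unfold pvGoodExt at h
  split at h
  · next r heq => exact ⟨r, heq, by simpa using h⟩
  · exact absurd h (by simp)

-- the core equivalence: "some extension is a suffix" = "the suffix from the last dot is an extension"
theorem pv_core (L : List String) (hL : ∀ e ∈ L, pvGoodExt e = true) (p : String) :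
    L.any (fun ext => PySem.Str.endswith p ext)
    = (if PySem.Str.rfind p "." = -1 then false
       else (PySem.Set.ofList L).contains (PySem.Str.slice p (some (PySem.Str.rfind p ".")) none)) := by
  have hrq : PySem.Str.rfind p "." = PySem.Chars.rfind.go p.toList ['.'] p.toList.length := by
    rw [PySem.Str.rfind_eq]; rfl
  rcases pv_rfind_go_spec p.toList p.toList.length with ⟨hneg, hnodot⟩ | ⟨i, hi, hgo, hdot, hmax⟩
  · rw [hrq, hneg, if_pos rfl]
    rw [List.any_eq_false]
    intro e he
    rcases pv_goodExt_spec e (hL e he) with ⟨r, her, hrdot⟩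
    rw [PySem.Str.endswith_eq]
    simp only [PySem.Chars.endswith, Bool.not_eq_true]
    rw [Bool.eq_false_iff]
    intro hsuf
    have hsuf' : e.toList <:+ p.toList := by
      rwa [List.isSuffixOf_iff_suffix] at hsuf
    have hmem : '.' ∈ p.toList := hsuf'.subset (by rw [her]; exact List.mem_cons_self)
    rcases List.getElem_of_mem hmem with ⟨n, hn, hq⟩
    exact hnodot n (by omega) (by rw [List.getElem?_eq_getElem hn, hq])
  · have hne : PySem.Str.rfind p "." ≠ -1 := by rw [hrq, hgo]; omega
    rw [if_neg hne]
    have hx : (PySem.Str.slice p (some (PySem.Str.rfind p ".")) none).toList = p.toList.drop i := by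
      rw [hrq, hgo]
      rw [PySem.Str.toList_slice, PySem.Chars.slice_eq_listSlice, PySem.List.slice_from_natCast]
    rw [Bool.eq_iff_iff]
    constructor
    · intro hany
      rcases List.any_eq_true.mp hany with ⟨e, he, hsuf⟩
      rw [PySem.Str.endswith_eq] at hsuf
      simp only [PySem.Chars.endswith] at hsuf
      rw [List.isSuffixOf_iff_suffix] at hsuf
      rcases pv_goodExt_spec e (hL e he) with ⟨r, her, hrdot⟩
      have hdrop : p.toList.drop i = e.toList := by
        rw [her]
        exact pv_drop_eq_of_suffix p.toList r i hrdot (her ▸ hsuf) hdot hmax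
      have hxe : PySem.Str.slice p (some (PySem.Str.rfind p ".")) none = e := by
        apply String.ext
        have := hx.trans hdrop
        simpa [String.toList] using this
      rw [PySem.Set.contains_iff, PySem.Set.mem_ofList, hxe]
      exact he
    · intro hc
      have hmem : PySem.Str.slice p (some (PySem.Str.rfind p ".")) none ∈ L := by
        rw [PySem.Set.contains_iff, PySem.Set.mem_ofList] at hc
        exact hc
      apply List.any_eq_true.mpr
      refine ⟨_, hmem, ?_⟩
      rw [PySem.Str.endswith_eq]
      simp only [PySem.Chars.endswith]
      rw [List.isSuffixOf_iff_suffix, hx]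
      exact List.drop_suffix i p.toList

-- ===== VERDICT (by name: the statement is the Claim_ definition above) =====
theorem is_ignored_path_py_spec : Claim_equal_is_ignored_path_py := by
  intro url_path _
  unfold Spec_is_ignored_path_py is_ignored_path_py is_ignored_path_py_alt
  by_cases h0 : url_path = ""
  · simp [h0]
  · rw [if_neg h0, if_neg h0]
    have hext : ∀ e ∈ pvEXTS, pvGoodExt e = true := by decide
    have hempty : (if PySem.Str.rfind (PySem.Str.lower "") "." = -1 then false
        else (PySem.Set.ofList pvEXTS).contains
          (PySem.Str.slice (PySem.Str.lower "") (some (PySem.Str.rfind (PySem.Str.lower "") ".")) none)) = false := by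
      decide
    rcases hsp : PySem.Str.splitMax? url_path "?" 1 with _ | parts
    · simpa using hempty.symm
    · cases parts with
      | nil => simpa [PySem.List.pyGet?] using hempty.symm
      | cons s rest =>
        have hget : PySem.List.pyGet? (s :: rest) (0 : Int) = some s := by
          simp
        simp only [hget, List.headD, Option.getD]
        exact pv_core pvEXTS hext (PySem.Str.lower s)
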